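-- pv_equiv track=rewrite | github.com/fwcode111/qyh | MSA_Star_Multi_core.py | insert_gaps_in_sequences
-- ===== SOURCE A (Python) =====
-- def add_gaps(mark: list, sequence: str):
--     result = ""
--     for i in range(len(mark)):
--         result += "-" * mark[i]
--         if i < len(mark) - 1:
--             result += sequence[i]
--     return result
--
-- def insert_gaps_in_sequences(aligned_strs: list, gap_marks: list, strs: list, center_idx: int):
--     aligned_sequences = [""] * len(strs)
--     aligned_sequences[center_idx] = add_gaps(gap_marks, strs[center_idx])
--     idx = 0
--     for aligned_str in aligned_strs:
--         mark = [0] * (len(aligned_str[0]) + 1)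
--         total = 0
--         pi = 0
--         pj = 0
--         for char in aligned_str[0]:
--             if char == '-':
--                 total += 1
--             else:
--                 mark[pi] = gap_marks[pj] - total
--                 pi += 1
--                 pj += 1
--                 while total != 0:
--                     pi += 1
--                     total -= 1
--         mark[pi] = gap_marks[pj] - total
--         if idx >= center_idx:
--             aligned_sequences[idx + 1] = add_gaps(mark, aligned_str[1])
--         else:
--             aligned_sequences[idx] = add_gaps(mark, aligned_str[1])
--         idx += 1
--     return aligned_sequences
-- ===== SOURCE B (Python) =====
-- def insert_gaps_in_sequences(aligned_strs: list, gap_marks: list, strs: list, center_idx: int):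
--     out = [""] * len(strs)
--     c = strs[center_idx]
--     head = '-' * gap_marks[0] if gap_marks else ''
--     out[center_idx] = head + ''.join(ch + '-' * g for ch, g in zip(c, gap_marks[1:]))
--     for idx, pair in enumerate(aligned_strs):
--         s0, s1 = pair[0], pair[1]
--         buf = []
--         k = 0   # characters of s1 already emitted
--         pj = 0
--         for i, ch in enumerate(s0):
--             if ch != '-':
--                 buf.append('-' * (gap_marks[pj] - (i - k)))
--                 buf.append(s1[k:i + 1])
--                 k = i + 1
--                 pj += 1
--         buf.append('-' * (gap_marks[pj] - (len(s0) - k)))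
--         buf.append(s1[k:len(s0)])
--         out[idx + 1 if idx >= center_idx else idx] = ''.join(buf)
--     return out
-- ===== Notes on version B (the rewrite author's own statement) =====
-- stated objective: alternative
-- what changed: B drops A's intermediate mark array and add_gaps helper: each row is produced by one fused scan over the pairwise alignment that emits gap runs and slices of the partner string directly, and the center row is built by a zip/join over gap_marks instead of add_gaps.
import Mathlib
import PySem

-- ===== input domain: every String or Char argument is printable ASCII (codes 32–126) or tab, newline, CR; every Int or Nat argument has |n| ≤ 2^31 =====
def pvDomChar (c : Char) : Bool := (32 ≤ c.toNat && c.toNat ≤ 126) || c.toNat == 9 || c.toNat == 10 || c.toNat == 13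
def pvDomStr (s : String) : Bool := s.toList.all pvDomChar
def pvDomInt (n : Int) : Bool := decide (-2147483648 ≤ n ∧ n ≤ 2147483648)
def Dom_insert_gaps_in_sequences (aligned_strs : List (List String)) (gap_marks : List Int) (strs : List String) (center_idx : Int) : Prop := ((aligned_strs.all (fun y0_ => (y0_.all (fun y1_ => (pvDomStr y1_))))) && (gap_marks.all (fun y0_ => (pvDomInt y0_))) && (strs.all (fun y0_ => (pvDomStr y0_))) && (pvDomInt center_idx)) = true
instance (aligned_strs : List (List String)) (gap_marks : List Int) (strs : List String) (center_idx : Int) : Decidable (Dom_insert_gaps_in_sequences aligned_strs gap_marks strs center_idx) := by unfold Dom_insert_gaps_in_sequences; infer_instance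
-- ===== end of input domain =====

-- B fuses A's two per-row passes (mark-array construction + add_gaps) into one scan with slices and
-- builds the center row by a zip/join; equivalence is about the return value (neither mutates its inputs).

-- "-" * n  (empty for n ≤ 0, exactly as in Python)
def dashes (n : Int) : List Char := List.replicate n.toNat '-'

-- Python index for a list of length n (wraparound for negative i; in range under Pre_)
def pyIdxW (i : Int) (n : Nat) : Nat := if i < 0 then (i + n).toNat else i.toNat

-- ===== PORT A =====
-- while total != 0: pi += 1; total -= 1
def skipA : Nat → Nat → Nat
  | pi, 0 => pi
  | pi, t + 1 => skipA (pi + 1) t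

-- add_gaps: for i in range(len(mark)): result += "-"*mark[i]; if i < len(mark)-1: result += sequence[i]
-- (sequence[i] exists under Pre_; the recursion peels mark entry i together with sequence[i])
def addGapsA : List Int → List Char → List Char
  | [], _ => []
  | [m], _ => dashes m
  | m :: ms, seq => dashes m ++ (match seq with | [] => [] | c :: _ => [c]) ++ addGapsA ms (seq.drop 1)

-- the inner `for char in aligned_str[0]` loop; state (mark, total, pi, pj);
-- gap_marks[pj] is in range under Pre_, so getD is exact
def markLoopA (gm : List Int) : List Char → List Int → Nat → Nat → Nat → List Int × Nat × Nat × Nat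
  | [], mark, total, pi, pj => (mark, total, pi, pj)
  | c :: cs, mark, total, pi, pj =>
    if c = '-' then markLoopA gm cs mark (total + 1) pi pj
    else markLoopA gm cs (mark.set pi (gm.getD pj 0 - (total : Int))) 0 (skipA (pi + 1) total) (pj + 1)

def insert_gaps_in_sequences (aligned_strs : List (List String)) (gap_marks : List Int) (strs : List String) (center_idx : Int) : List String :=
  let n := strs.length
  let a0 := List.replicate n ""
  let c := ((PySem.List.pyGet? strs center_idx).getD "").toList
  let a1 := a0.set (pyIdxW center_idx n) (String.ofList (addGapsA gap_marks c))
  (aligned_strs.foldl (fun (acc : List String × Nat) p =>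
      let s0 := (p.getD 0 "").toList   -- aligned_str[0] (exists under Pre_)
      let s1 := (p.getD 1 "").toList   -- aligned_str[1]
      let st := markLoopA gap_marks s0 (List.replicate (s0.length + 1) 0) 0 0 0
      let mark := st.1.set st.2.2.1 (gap_marks.getD st.2.2.2 0 - (st.2.1 : Int))
      let tgt := if center_idx ≤ (acc.2 : Int) then acc.2 + 1 else acc.2
      (acc.1.set tgt (String.ofList (addGapsA mark s1)), acc.2 + 1)) (a1, 0)).1

-- ===== PORT B =====
-- the fused scan: i = columns processed, k = chars of s1 consumed, pj = next gap mark;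
-- s1[k:i+1] / s1[k:len(s0)] with 0 ≤ k ≤ i are exactly (s1.drop k).take (…)
def fusedLoopB (gm : List Int) (s1 : List Char) : List Char → Nat → Nat → Nat → List Char
  | [], i, k, pj => dashes (gm.getD pj 0 - ((i - k : Nat) : Int)) ++ (s1.drop k).take (i - k)
  | c :: cs, i, k, pj =>
    if c = '-' then fusedLoopB gm s1 cs (i + 1) k pj
    else dashes (gm.getD pj 0 - ((i - k : Nat) : Int)) ++ (s1.drop k).take (i + 1 - k)
         ++ fusedLoopB gm s1 cs (i + 1) (i + 1) (pj + 1)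

-- head + ''.join(ch + '-'*g for ch, g in zip(c, gap_marks[1:]))
def centerB (gm : List Int) (c : List Char) : List Char :=
  match gm with
  | [] => []
  | g :: gs => dashes g ++ (c.zip gs).flatMap (fun p => p.1 :: dashes p.2)

def insert_gaps_in_sequences_alt (aligned_strs : List (List String)) (gap_marks : List Int) (strs : List String) (center_idx : Int) : List String :=
  let n := strs.length
  let out0 := List.replicate n ""
  let c := ((PySem.List.pyGet? strs center_idx).getD "").toList
  let out1 := out0.set (pyIdxW center_idx n) (String.ofList (centerB gap_marks c))
  (aligned_strs.foldl (fun (acc : List String × Nat) p =>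
      let s0 := (p.getD 0 "").toList
      let s1 := (p.getD 1 "").toList
      let tgt := if center_idx ≤ (acc.2 : Int) then acc.2 + 1 else acc.2
      (acc.1.set tgt (String.ofList (fusedLoopB gap_marks s1 s0 0 0 0)), acc.2 + 1)) (out1, 0)).1

-- ===== PRECONDITION & SPEC =====
def nonGapCount (l : List Char) : Nat := l.countP (fun c => c ≠ '-')

-- exactly the inputs on which A raises no exception: center_idx a valid Python index into strs,
-- the center sequence long enough for add_gaps(gap_marks, ·), every row of length ≥ 2 with
-- row[1] at least as long as row[0] and gap_marks covering all residues of row[0], and every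
-- row's write target inside aligned_sequences
def Pre_insert_gaps_in_sequences (aligned_strs : List (List String)) (gap_marks : List Int) (strs : List String) (center_idx : Int) : Prop :=
  0 ≤ center_idx + strs.length ∧ center_idx < strs.length ∧
  gap_marks.length ≤ ((PySem.List.pyGet? strs center_idx).getD "").toList.length + 1 ∧
  (∀ p ∈ aligned_strs, 2 ≤ p.length ∧
      (p.getD 0 "").toList.length ≤ (p.getD 1 "").toList.length ∧
      nonGapCount (p.getD 0 "").toList + 1 ≤ gap_marks.length) ∧
  (∀ i : Nat, i < aligned_strs.length → (if center_idx ≤ (i : Int) then (i : Int) + 1 else (i : Int)) < strs.length)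

instance (aligned_strs : List (List String)) (gap_marks : List Int) (strs : List String) (center_idx : Int) : Decidable (Pre_insert_gaps_in_sequences aligned_strs gap_marks strs center_idx) := by unfold Pre_insert_gaps_in_sequences; infer_instance

def pvWitness_insert_gaps_in_sequences : List (List String) × List Int × List String × Int :=
  ([["AB-", "ABC"]], [0, 0, 0], ["AB", "C"], 0)

def Spec_insert_gaps_in_sequences (aligned_strs : List (List String)) (gap_marks : List Int) (strs : List String) (center_idx : Int) (out : List String) : Prop := out = insert_gaps_in_sequences_alt aligned_strs gap_marks strs center_idx
instance (aligned_strs : List (List String)) (gap_marks : List Int) (strs : List String) (center_idx : Int) (out : List String) : Decidable (Spec_insert_gaps_in_sequences aligned_strs gap_marks strs center_idx out) := by unfold Spec_insert_gaps_in_sequences; infer_instance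

-- ===== CLAIM (what is proved, stated in full; the proofs are below) =====
def Claim_equal_insert_gaps_in_sequences : Prop := ∀ (aligned_strs : List (List String)) (gap_marks : List Int) (strs : List String) (center_idx : Int), Dom_insert_gaps_in_sequences aligned_strs gap_marks strs center_idx → Pre_insert_gaps_in_sequences aligned_strs gap_marks strs center_idx → Spec_insert_gaps_in_sequences aligned_strs gap_marks strs center_idx (insert_gaps_in_sequences aligned_strs gap_marks strs center_idx)

-- ===== LEMMAS AND PROOFS =====

-- the final mark array of A's inner loop, characterised directly by the column string
def fM (gm : List Int) : List Char → Nat → Nat → List Int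
  | [], total, pj => (gm.getD pj 0 - (total : Int)) :: List.replicate total 0
  | c :: cs, total, pj =>
    if c = '-' then fM gm cs (total + 1) pj
    else (gm.getD pj 0 - (total : Int)) :: (List.replicate total 0 ++ fM gm cs 0 (pj + 1))

-- A's trailing `mark[pi] = gap_marks[pj] - total` applied to the loop's final state
def finA (gm : List Int) (st : List Int × Nat × Nat × Nat) : List Int :=
  st.1.set st.2.2.1 (gm.getD st.2.2.2 0 - (st.2.1 : Int))

lemma skipA_eq (t : Nat) : ∀ pi, skipA pi t = pi + t := by
  induction t with
  | zero => intro pi; simp [skipA]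
  | succ t ih => intro pi; rw [skipA, ih]; omega

lemma set_append {α : Type} (pre l : List α) (v : α) :
    (pre ++ l).set pre.length v = pre ++ l.set 0 v := by
  induction pre with
  | nil => simp
  | cons a pre ih => simp [ih]

lemma fM_ne_nil (gm : List Int) (cs : List Char) : ∀ total pj, fM gm cs total pj ≠ [] := by
  induction cs with
  | nil => intro total pj; simp [fM]
  | cons c cs ih =>
    intro total pj
    simp only [fM]
    split
    · exact ih _ _
    · simp

lemma mark_char (gm : List Int) (cs : List Char) : ∀ (pre : List Int) (total pj : Nat),
    finA gm (markLoopA gm cs (pre ++ List.replicate (cs.length + total + 1) 0) total pre.length pj)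
    = pre ++ fM gm cs total pj := by
  induction cs with
  | nil =>
    intro pre total pj
    simp only [markLoopA, fM, List.length_nil, Nat.zero_add, List.replicate_succ, finA]
    rw [set_append]
    simp
  | cons c cs ih =>
    intro pre total pj
    simp only [List.length_cons]
    by_cases hc : c = '-'
    · simp only [markLoopA]
      rw [if_pos hc]
      rw [show cs.length + 1 + total + 1 = cs.length + (total + 1) + 1 from by omega]
      rw [ih pre (total + 1) pj]
      simp only [fM]
      rw [if_pos hc]
    · simp only [markLoopA]
      rw [if_neg hc]
      have h1 : (pre ++ List.replicate (cs.length + 1 + total + 1) (0 : Int)).set pre.length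
            (gm.getD pj 0 - (total : Int))
          = (pre ++ (gm.getD pj 0 - (total : Int)) :: List.replicate total 0)
              ++ List.replicate (cs.length + 0 + 1) 0 := by
        rw [set_append]
        rw [show cs.length + 1 + total + 1 = (total + (cs.length + 1)) + 1 from by omega]
        rw [List.replicate_succ, List.set_cons_zero, List.replicate_add]
        simp
      have h2 : skipA (pre.length + 1) total
          = (pre ++ (gm.getD pj 0 - (total : Int)) :: List.replicate total 0).length := by
        rw [skipA_eq]; simp; omega
      rw [h1, h2, ih (pre ++ (gm.getD pj 0 - (total : Int)) :: List.replicate total 0) 0 (pj + 1)]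
      simp only [fM]
      rw [if_neg hc]
      simp

lemma addGapsA_cons₂ (m1 m2 : Int) (ms : List Int) (s : List Char) :
    addGapsA (m1 :: m2 :: ms) s = dashes m1 ++ s.take 1 ++ addGapsA (m2 :: ms) (s.drop 1) := by
  cases s <;> simp [addGapsA]

lemma addGaps_one (t : Nat) : ∀ (v : Int) (s : List Char),
    addGapsA (v :: List.replicate t 0) s = dashes v ++ s.take t := by
  induction t with
  | zero => intro v s; simp [addGapsA, dashes]
  | succ t ih =>
    intro v s
    rw [List.replicate_succ, addGapsA_cons₂, ih 0 (s.drop 1)]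
    have h1 : s.take 1 ++ (s.drop 1).take t = s.take (t + 1) := by
      rw [show t + 1 = 1 + t from by omega, List.take_add]
    simp only [dashes, Int.toNat_zero, List.replicate_zero, List.nil_append, List.append_assoc]
    rw [h1]

lemma addGaps_split (t : Nat) : ∀ (v : Int) (ms : List Int) (s : List Char), ms ≠ [] →
    addGapsA (v :: (List.replicate t 0 ++ ms)) s
      = dashes v ++ (s.take (t + 1) ++ addGapsA ms (s.drop (t + 1))) := by
  induction t with
  | zero =>
    intro v ms s hms
    cases ms with
    | nil => exact absurd rfl hms
    | cons m2 ms' =>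
      rw [List.replicate_zero, List.nil_append, addGapsA_cons₂]
      simp
  | succ t ih =>
    intro v ms s hms
    rw [List.replicate_succ, List.cons_append, addGapsA_cons₂, ih 0 ms (s.drop 1) hms]
    have h1 : s.take 1 ++ (s.drop 1).take (t + 1) = s.take (1 + (t + 1)) := (List.take_add ..).symm
    rw [show 1 + (t + 1) = t + 1 + 1 from by omega] at h1
    have h2 : (s.drop 1).drop (t + 1) = s.drop (t + 1 + 1) := by
      rw [List.drop_drop]; congr 1; omega
    simp only [dashes, Int.toNat_zero, List.replicate_zero, List.nil_append, List.append_assoc, h2]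
    rw [← List.append_assoc (s.take 1), h1]

lemma fused_eq (gm : List Int) (s1 : List Char) (cs : List Char) : ∀ (i k pj : Nat), k ≤ i →
    fusedLoopB gm s1 cs i k pj = addGapsA (fM gm cs (i - k) pj) (s1.drop k) := by
  induction cs with
  | nil =>
    intro i k pj _
    simp only [fusedLoopB, fM, addGaps_one]
  | cons c cs ih =>
    intro i k pj hk
    by_cases hc : c = '-'
    · simp only [fusedLoopB, fM]
      rw [if_pos hc, if_pos hc, ih (i + 1) k pj (by omega),
        show i + 1 - k = (i - k) + 1 from by omega]
    · simp only [fusedLoopB, fM]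
      rw [if_neg hc, if_neg hc]
      rw [addGaps_split (i - k) _ _ _ (fM_ne_nil gm cs 0 (pj + 1))]
      rw [ih (i + 1) (i + 1) (pj + 1) le_rfl]
      have h2 : (s1.drop k).drop ((i - k) + 1) = s1.drop (i + 1) := by
        rw [List.drop_drop]; congr 1; omega
      rw [show i + 1 - k = (i - k) + 1 from by omega, h2,
        show i + 1 - (i + 1) = 0 from by omega]
      simp

lemma row_eq (gm : List Int) (s0 s1 : List Char) :
    addGapsA (finA gm (markLoopA gm s0 (List.replicate (s0.length + 1) 0) 0 0 0)) s1
    = fusedLoopB gm s1 s0 0 0 0 := by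
  have h := mark_char gm s0 [] 0 0
  simp only [List.nil_append, List.length_nil, Nat.add_zero] at h
  rw [h, fused_eq gm s1 s0 0 0 0 le_rfl]
  simp

lemma center_aux (gs : List Int) : ∀ (g : Int) (c : List Char), gs.length ≤ c.length →
    addGapsA (g :: gs) c = dashes g ++ (c.zip gs).flatMap (fun p => p.1 :: dashes p.2) := by
  induction gs with
  | nil => intro g c _; simp [addGapsA]
  | cons g2 gs' ih =>
    intro g c hlen
    cases c with
    | nil => simp at hlen
    | cons ch c' =>
      rw [addGapsA_cons₂]
      simp only [List.take_succ_cons, List.take_zero, List.drop_succ_cons, List.drop_zero]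
      rw [ih g2 c' (by simpa using hlen)]
      simp

lemma center_eq (gm : List Int) (c : List Char) (h : gm.length ≤ c.length + 1) :
    addGapsA gm c = centerB gm c := by
  cases gm with
  | nil => simp [addGapsA, centerB]
  | cons g gs => exact center_aux gs g c (by simpa using h)

lemma foldl_rows_eq (gm : List Int) (cidx : Int) (l : List (List String)) :
    ∀ acc : List String × Nat,
    l.foldl (fun (acc : List String × Nat) p =>
      (acc.1.set (if cidx ≤ (acc.2 : Int) then acc.2 + 1 else acc.2)
        (String.ofList (addGapsA
          ((markLoopA gm (p.getD 0 "").toList (List.replicate ((p.getD 0 "").toList.length + 1) 0) 0 0 0).1.set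
            (markLoopA gm (p.getD 0 "").toList (List.replicate ((p.getD 0 "").toList.length + 1) 0) 0 0 0).2.2.1
            (gm.getD (markLoopA gm (p.getD 0 "").toList (List.replicate ((p.getD 0 "").toList.length + 1) 0) 0 0 0).2.2.2 0
              - ((markLoopA gm (p.getD 0 "").toList (List.replicate ((p.getD 0 "").toList.length + 1) 0) 0 0 0).2.1 : Int)))
          (p.getD 1 "").toList)), acc.2 + 1)) acc
    = l.foldl (fun (acc : List String × Nat) p =>
      (acc.1.set (if cidx ≤ (acc.2 : Int) then acc.2 + 1 else acc.2)
        (String.ofList (fusedLoopB gm (p.getD 1 "").toList (p.getD 0 "").toList 0 0 0)), acc.2 + 1)) acc := by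
  induction l with
  | nil => intro acc; rfl
  | cons p l ih =>
    intro acc
    simp only [List.foldl_cons]
    have hrow := row_eq gm ((p.getD 0 "").toList) ((p.getD 1 "").toList)
    simp only [finA] at hrow
    rw [hrow]
    exact ih _

-- ===== VERDICT (by name: the statement is the Claim_ definition above) =====
theorem insert_gaps_in_sequences_spec : Claim_equal_insert_gaps_in_sequences := by
  intro aligned_strs gap_marks strs center_idx _hdom hpre
  obtain ⟨_, _, hcen, _, _⟩ := hpre
  show insert_gaps_in_sequences aligned_strs gap_marks strs center_idx
      = insert_gaps_in_sequences_alt aligned_strs gap_marks strs center_idx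
  unfold insert_gaps_in_sequences insert_gaps_in_sequences_alt
  dsimp only
  rw [center_eq gap_marks _ hcen]
  rw [foldl_rows_eq gap_marks center_idx aligned_strs]
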